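-- pv_equiv track=rewrite | github.com/yujhtheyujh/dmoj-solutions | cco13p1.py | ispalim
-- ===== SOURCE A (Python) =====
-- def ispalim(aa, bb):
--     ll = []
--     while aa:
--         ll.append(aa % bb)
--         aa //= bb
--     for i in range(len(ll)):
--         if ll[i] != ll[-i - 1]:
--             return False
--     return True
-- ===== SOURCE B (Python) =====
-- def ispalim(aa, bb):
--     original = aa
--     rev = 0
--     while aa:
--         rev = rev * bb + aa % bb
--         aa //= bb
--     return rev == original
-- ===== Notes on version B (the rewrite author's own statement) =====
-- stated objective: simpler
-- what changed: B reverses the base-bb representation arithmetically in a single integer accumulator (rev = rev*bb + digit) and compares it to the original number, instead of materialising a digit list and running a second two-pointer index loop over it.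
import Mathlib
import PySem

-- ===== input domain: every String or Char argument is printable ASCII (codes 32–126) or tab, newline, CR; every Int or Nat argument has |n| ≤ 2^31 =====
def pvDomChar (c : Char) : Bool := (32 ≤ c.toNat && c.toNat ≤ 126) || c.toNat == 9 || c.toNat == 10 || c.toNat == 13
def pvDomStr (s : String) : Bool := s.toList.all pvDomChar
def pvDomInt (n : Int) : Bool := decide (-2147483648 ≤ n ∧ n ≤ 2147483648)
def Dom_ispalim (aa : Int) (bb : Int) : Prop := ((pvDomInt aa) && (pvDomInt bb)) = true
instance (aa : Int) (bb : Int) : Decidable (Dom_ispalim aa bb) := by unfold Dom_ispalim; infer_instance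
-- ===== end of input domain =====

-- B reverses the base-bb representation arithmetically in one integer accumulator instead of
-- building a digit list and palindrome-checking it with a second index loop; same return value on Pre_.

-- ===== PORT A =====
-- the 'while aa:' loop, fuel-bounded; fuel 2*|aa|+2 suffices on every input of Pre_ (proved below).
-- returns (digit list, leftover aa when fuel runs out — 0 on Pre_).
def pvDigitsLoop : Nat → Int → Int → List Int × Int
  | 0, aa, _ => ([], aa)
  | f + 1, aa, bb =>
    if aa = 0 then ([], 0)
    else
      let p := pvDigitsLoop f (PySem.Int.floordiv aa bb) bb
      (PySem.Int.mod aa bb :: p.1, p.2)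

-- 'for i in range(len(ll)): if ll[i] != ll[-i-1]: return False' / 'return True'
def pvPalLoop (L : List Int) : List Int → Bool
  | [] => true
  | i :: rest =>
    if PySem.List.pyGet? L i ≠ PySem.List.pyGet? L (-i - 1) then false else pvPalLoop L rest

def ispalim (aa : Int) (bb : Int) : Bool :=
  let L := (pvDigitsLoop (2 * aa.natAbs + 2) aa bb).1
  pvPalLoop L (PySem.List.pyRange 0 (L.length : Int) 1)

-- ===== PORT B =====
-- the same 'while aa:' loop shape, accumulating rev = rev*bb + aa%bb
def pvRevLoop : Nat → Int → Int → Int → Int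
  | 0, _, _, rev => rev
  | f + 1, aa, bb, rev =>
    if aa = 0 then rev
    else pvRevLoop f (PySem.Int.floordiv aa bb) bb (rev * bb + PySem.Int.mod aa bb)

def ispalim_alt (aa : Int) (bb : Int) : Bool :=
  decide (pvRevLoop (2 * aa.natAbs + 2) aa bb 0 = aa)

-- ===== PRECONDITION & SPEC =====
-- exactly the inputs on which A's while-loop terminates (elsewhere A raises ZeroDivisionError at
-- bb = 0 or loops forever: bb ∈ {-1, 1} with aa ≠ 0, or aa < 0 with bb ≥ 2 stalls at aa = -1).
def Pre_ispalim (aa : Int) (bb : Int) : Prop := aa = 0 ∨ bb ≤ -2 ∨ (0 < aa ∧ 2 ≤ bb)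
instance (aa : Int) (bb : Int) : Decidable (Pre_ispalim aa bb) := by unfold Pre_ispalim; infer_instance

def pvWitness_ispalim : Int × Int := (5, 2)

def Spec_ispalim (aa : Int) (bb : Int) (out : Bool) : Prop := out = ispalim_alt aa bb
instance (aa : Int) (bb : Int) (out : Bool) : Decidable (Spec_ispalim aa bb out) := by unfold Spec_ispalim; infer_instance

-- ===== CLAIM (what is proved, stated in full; the proofs are below) =====
def Claim_equal_ispalim : Prop := ∀ (aa : Int) (bb : Int), Dom_ispalim aa bb → Pre_ispalim aa bb → Spec_ispalim aa bb (ispalim aa bb)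

-- ===== LEMMAS AND PROOFS =====

-- value of a least-significant-first digit list in base bb
def pvVal (bb : Int) : List Int → Int
  | [] => 0
  | d :: L => pvVal bb L * bb + d

theorem pvVal_append_singleton (bb d : Int) (M : List Int) :
    pvVal bb (M ++ [d]) = pvVal bb M + d * bb ^ M.length := by
  induction M with
  | nil => simp [pvVal]
  | cons x M ih => simp [pvVal, ih, pow_succ]; ring

-- B's accumulator computes the value of the REVERSED digit list
theorem pvRevLoop_eq (f : Nat) : ∀ (aa bb r : Int),
    pvRevLoop f aa bb r =
      pvVal bb (pvDigitsLoop f aa bb).1.reverse + r * bb ^ (pvDigitsLoop f aa bb).1.length := by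
  induction f with
  | zero => intro aa bb r; simp [pvRevLoop, pvDigitsLoop, pvVal]
  | succ f ih =>
    intro aa bb r
    by_cases h : aa = 0
    · simp [pvRevLoop, pvDigitsLoop, h, pvVal]
    · simp only [pvRevLoop, pvDigitsLoop, h]
      rw [ih]
      simp [pvVal_append_singleton, pow_succ]
      ring

-- the loop invariant of A's digit extraction: digits + leftover reconstruct aa
theorem pvDigitsLoop_reconstruct (f : Nat) : ∀ (aa bb : Int),
    pvVal bb (pvDigitsLoop f aa bb).1 +
      (pvDigitsLoop f aa bb).2 * bb ^ (pvDigitsLoop f aa bb).1.length = aa := by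
  induction f with
  | zero => intro aa bb; simp [pvDigitsLoop, pvVal]
  | succ f ih =>
    intro aa bb
    by_cases h : aa = 0
    · simp [pvDigitsLoop, h, pvVal]
    · simp only [pvDigitsLoop, if_neg h]
      have h1 := ih (PySem.Int.floordiv aa bb) bb
      have h2 := PySem.Int.floordiv_mul_add_mod aa bb
      simp only [pvVal, List.length_cons, pow_succ]
      linear_combination bb * h1 + h2

-- every extracted digit lies in the canonical residue range of bb
theorem pvDigitsLoop_range (f : Nat) : ∀ (aa bb d : Int), d ∈ (pvDigitsLoop f aa bb).1 →
    (0 < bb → 0 ≤ d ∧ d < bb) ∧ (bb < 0 → bb < d ∧ d ≤ 0) := by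
  induction f with
  | zero => intro aa bb d hd; simp [pvDigitsLoop] at hd
  | succ f ih =>
    intro aa bb d hd
    by_cases h : aa = 0
    · simp [pvDigitsLoop, h] at hd
    · simp only [pvDigitsLoop, if_neg h, List.mem_cons] at hd
      rcases hd with rfl | hd
      · exact ⟨fun hb => ⟨PySem.Int.mod_nonneg _ hb, PySem.Int.mod_lt _ hb⟩,
               fun hb => PySem.Int.mod_neg_bounds _ hb⟩
      · exact ih _ _ _ hd

-- uniqueness of fixed-length canonical digit expansions
theorem pvVal_inj (bb : Int) (hb : 2 ≤ bb ∨ bb ≤ -2) :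
    ∀ (L1 L2 : List Int), L1.length = L2.length →
      (∀ d ∈ L1, (0 < bb → 0 ≤ d ∧ d < bb) ∧ (bb < 0 → bb < d ∧ d ≤ 0)) →
      (∀ d ∈ L2, (0 < bb → 0 ≤ d ∧ d < bb) ∧ (bb < 0 → bb < d ∧ d ≤ 0)) →
      pvVal bb L1 = pvVal bb L2 → L1 = L2 := by
  intro L1
  induction L1 with
  | nil => intro L2 hlen _ _ _; cases L2 <;> simp_all
  | cons d1 T1 ih =>
    intro L2 hlen hr1 hr2 hv
    cases L2 with
    | nil => simp at hlen
    | cons d2 T2 =>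
      simp only [pvVal] at hv
      have hd1 := hr1 d1 (by simp)
      have hd2 := hr2 d2 (by simp)
      have hk : d1 - d2 = (pvVal bb T2 - pvVal bb T1) * bb := by ring_nf; linarith
      have hdd : d1 = d2 := by
        by_contra hne
        have hk0 : pvVal bb T2 - pvVal bb T1 ≠ 0 := by
          intro h0; rw [h0, zero_mul] at hk; omega
        set k := pvVal bb T2 - pvVal bb T1 with hkdef
        rcases hb with hb | hb
        · have hp := hd1.1 (by omega); have hq := hd2.1 (by omega)
          rcases lt_or_gt_of_ne hk0 with hkneg | hkpos
          · nlinarith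
          · nlinarith
        · have hp := hd1.2 (by omega); have hq := hd2.2 (by omega)
          rcases lt_or_gt_of_ne hk0 with hkneg | hkpos
          · nlinarith
          · nlinarith
      subst hdd
      have hT : pvVal bb T1 = pvVal bb T2 := by
        have hbne : bb ≠ 0 := by omega
        have : pvVal bb T1 * bb = pvVal bb T2 * bb := by linarith
        exact mul_right_cancel₀ hbne this
      have := ih T2 (by simpa using hlen) (fun d hd => hr1 d (by simp [hd]))
        (fun d hd => hr2 d (by simp [hd])) hT
      simp [this]

-- closure of the termination region under one loop step, with a decreasing measure
theorem pvStep (aa bb : Int) (hb : bb ≤ -2 ∨ (2 ≤ bb ∧ 0 ≤ aa)) (ha : aa ≠ 0) :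
    (bb ≤ -2 ∨ (2 ≤ bb ∧ 0 ≤ PySem.Int.floordiv aa bb)) ∧
    2 * (PySem.Int.floordiv aa bb).natAbs +
        (if 0 < PySem.Int.floordiv aa bb ∧ bb < 0 then 1 else 0) <
      2 * aa.natAbs + (if 0 < aa ∧ bb < 0 then 1 else 0) := by
  set q := PySem.Int.floordiv aa bb with hq
  have hrec := PySem.Int.floordiv_mul_add_mod aa bb
  rcases hb with hb | ⟨hb, ha0⟩
  · have hr := PySem.Int.mod_neg_bounds aa (show bb < 0 by omega)
    rcases lt_or_gt_of_ne ha with haneg | hapos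
    · -- aa < 0, bb ≤ -2 : q ≥ 0 and 2q ≤ -aa
      have hq0 : 0 ≤ q := by nlinarith
      have hbound : 2 * q ≤ -aa := by nlinarith
      constructor
      · left; exact hb
      · split_ifs <;> omega
    · -- aa > 0, bb ≤ -2 : q ≤ -1 and 2*(-q) ≤ aa + 1
      have hq0 : q ≤ -1 := by nlinarith
      have hbound : 2 * (-q) ≤ aa + 1 := by nlinarith
      constructor
      · left; exact hb
      · split_ifs <;> omega
  · -- 2 ≤ bb, 0 ≤ aa, aa ≠ 0 so aa > 0 : 0 ≤ q < aa
    have hapos : 0 < aa := by omega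
    have hr1 := PySem.Int.mod_nonneg aa (show 0 < bb by omega)
    have hr2 := PySem.Int.mod_lt aa (show 0 < bb by omega)
    have hq0 : 0 ≤ q := by nlinarith
    have hqlt : q < aa := by nlinarith
    constructor
    · right; exact ⟨hb, hq0⟩
    · split_ifs <;> omega

-- with fuel above the measure, the loop drains aa to 0
theorem pvRemZero (f : Nat) : ∀ (aa bb : Int), (bb ≤ -2 ∨ (2 ≤ bb ∧ 0 ≤ aa)) →
    2 * aa.natAbs + (if 0 < aa ∧ bb < 0 then 1 else 0) < f →
    (pvDigitsLoop f aa bb).2 = 0 := by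
  induction f with
  | zero => intro aa bb _ hf; omega
  | succ f ih =>
    intro aa bb hb hf
    by_cases h : aa = 0
    · simp [pvDigitsLoop, h]
    · obtain ⟨hb', hdec⟩ := pvStep aa bb hb h
      simp only [pvDigitsLoop, if_neg h]
      exact ih _ _ hb' (by omega)

-- A's palindrome loop over an index list
theorem pvPalLoop_iff (L : List Int) (idxs : List Int) :
    pvPalLoop L idxs = true ↔ ∀ i ∈ idxs, PySem.List.pyGet? L i = PySem.List.pyGet? L (-i - 1) := by
  induction idxs with
  | nil => simp [pvPalLoop]
  | cons i rest ih =>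
    simp only [pvPalLoop, List.mem_cons]
    split_ifs with h
    · constructor
      · intro hf; simp at hf
      · intro hall; exact (h (hall i (Or.inl rfl))).elim
    · rw [ih]
      constructor
      · intro hall j hj
        rcases hj with rfl | hj
        · exact not_not.mp h
        · exact hall j hj
      · intro hall j hj; exact hall j (Or.inr hj)

-- A's loop over range(len L) decides 'L is a palindrome'
theorem pvPalLoop_range (L : List Int) :
    pvPalLoop L (PySem.List.pyRange 0 (L.length : Int) 1) = decide (L.reverse = L) := by
  rcases hpal : decide (L.reverse = L) with _ | _
  · simp only [decide_eq_false_iff_not] at hpal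
    rw [Bool.eq_false_iff]
    intro htrue
    rw [pvPalLoop_iff] at htrue
    apply hpal
    apply List.ext_getElem (by simp)
    intro j hj1 hj2
    have hjlen : j < L.length := hj2
    have hmem : (j : Int) ∈ PySem.List.pyRange 0 (L.length : Int) 1 := by
      rw [PySem.List.mem_pyRange_one]; omega
    have := htrue (j : Int) hmem
    rw [PySem.List.pyGet?_natCast] at this
    have hneg : -(j : Int) - 1 = -((j + 1 : Nat) : Int) := by push_cast; ring
    rw [hneg, PySem.List.pyGet?_neg_natCast L (j+1) (by omega) (by omega)] at this
    have e1 : L.reverse[j]? = L[L.length - 1 - j]? := List.getElem?_reverse hjlen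
    have hnn : L.length - 1 - j = L.length - (j + 1) := by omega
    rw [hnn, ← this] at e1
    rw [List.getElem?_eq_getElem hj1, List.getElem?_eq_getElem hjlen] at e1
    exact Option.some.inj e1
  · simp only [decide_eq_true_eq] at hpal
    rw [pvPalLoop_iff]
    intro i hi
    rw [PySem.List.mem_pyRange_one] at hi
    obtain ⟨hi0, hin⟩ := hi
    set j := i.toNat with hj
    have hij : i = (j : Int) := by omega
    have hjlen : j < L.length := by omega
    rw [hij, PySem.List.pyGet?_natCast]
    have hneg : -(j : Int) - 1 = -((j + 1 : Nat) : Int) := by push_cast; ring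
    rw [hneg, PySem.List.pyGet?_neg_natCast L (j+1) (by omega) (by omega)]
    have e1 : L.reverse[j]? = L[L.length - 1 - j]? := List.getElem?_reverse hjlen
    rw [hpal] at e1
    have hnn : L.length - 1 - j = L.length - (j + 1) := by omega
    rw [hnn] at e1
    exact e1

-- ===== VERDICT (by name: the statement is the Claim_ definition above) =====
theorem ispalim_spec : Claim_equal_ispalim := by
  intro aa bb _hdom hpre
  unfold Spec_ispalim
  by_cases ha : aa = 0
  · subst ha
    simp [ispalim, ispalim_alt, pvDigitsLoop, pvRevLoop, pvPalLoop,
      PySem.List.pyRange_one_eq_nil]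
  · have hb : bb ≤ -2 ∨ (2 ≤ bb ∧ 0 ≤ aa) := by
      rcases hpre with h | h | h
      · exact absurd h ha
      · left; exact h
      · right; omega
    have hb2 : 2 ≤ bb ∨ bb ≤ -2 := by omega
    set f := 2 * aa.natAbs + 2 with hf
    have hrem : (pvDigitsLoop f aa bb).2 = 0 := by
      apply pvRemZero _ _ _ hb
      split_ifs <;> omega
    set L := (pvDigitsLoop f aa bb).1 with hL
    have hval : pvVal bb L = aa := by
      have := pvDigitsLoop_reconstruct f aa bb
      rw [← hL, hrem] at this
      simpa using this
    have hrev : pvRevLoop f aa bb 0 = pvVal bb L.reverse := by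
      rw [pvRevLoop_eq]; simp [← hL]
    have hA : ispalim aa bb = decide (L.reverse = L) := by
      rw [ispalim]; exact pvPalLoop_range L
    have hBiff : (pvRevLoop f aa bb 0 = aa) ↔ L.reverse = L := by
      rw [hrev, ← hval]
      constructor
      · intro h
        apply pvVal_inj bb hb2 L.reverse L (by simp)
          (fun d hd => pvDigitsLoop_range f aa bb d (by simpa using hd))
          (fun d hd => pvDigitsLoop_range f aa bb d (by rw [hL] at hd; exact hd))
          h
      · intro h; rw [h]
    rw [hA, ispalim_alt]
    simp only [← hf]
    rcases hcase : decide (L.reverse = L) with _ | _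
    · simp only [decide_eq_false_iff_not] at hcase
      simp [hBiff, hcase]
    · simp only [decide_eq_true_eq] at hcase
      simp [hBiff, hcase]
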